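-- pv_equiv track=rewrite | github.com/chrisbirt/AdventOfCode | AoC_2023/day13.py | find_mirror_index
-- ===== SOURCE A (Python) =====
-- def find_mirror_index(pattern, diff):
--
--     # Compare each row with the next for any differences.
--     # for part 1, diff = 0, for part 2, diff = 1 (ie, just one difference)
--
--     for y in range(len(pattern)-1):
--
--         diffs = 0
--
--         # compare this row to the next one, then the prior row to the next+1 etc until we hit a boundary
--         #
--         prior, next = y, y + 1
--         while 0 <= prior < next < len(pattern):
--
--             # compare each character in the two rows. Keep a count of any differences
--             #
--             for x in range(len(pattern[0])):
--                 diffs += 1 if (pattern[prior][x] != pattern[next][x]) else 0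
--
--             prior, next = prior - 1, next + 1
--
--         # we've compared all the prior/next rows around the current row (y).
--         # if we have the right number of differences, return the row number
--         #
--         if diffs == diff:
--             return y + 1
--
--     return 0
-- ===== SOURCE B (Python) =====
-- def find_mirror_index(pattern, diff):
--     n = len(pattern)
--     if n == 0:
--         return 0
--     w = len(pattern[0])
--     rows = [p[:w] for p in pattern]
--     # stage 1: precompute the mismatch count for every (ordered) pair of rows
--     m = {}
--     for p in range(n):
--         for q in range(p + 1, n):
--             m[(p, q)] = sum(a != b for a, b in zip(rows[p], rows[q]))
--     # stage 2: a reflection between rows y and y+1 pairs up rows whose index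
--     # sum is s = 2*y + 1; total the precomputed table along that anti-diagonal
--     for y in range(n - 1):
--         s = 2 * y + 1
--         total = sum(m[(p, s - p)] for p in range(max(0, s - n + 1), y + 1))
--         if total == diff:
--             return y + 1
--     return 0
-- ===== Notes on version B (the rewrite author's own statement) =====
-- stated objective: alternative
-- what changed: B is staged: it first precomputes the mismatch count of every pair of width-truncated rows into a table keyed by (p,q), then tests each candidate line y by totalling the table along the anti-diagonal p+q=2y+1, replacing A's per-candidate expand-outward rescan of characters; same asymptotic cost.
-- outside the precondition, e.g. on find_mirror_index(['ab', 'ab', 'a'], 0): A returns 1, B returns 1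
import Mathlib
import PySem

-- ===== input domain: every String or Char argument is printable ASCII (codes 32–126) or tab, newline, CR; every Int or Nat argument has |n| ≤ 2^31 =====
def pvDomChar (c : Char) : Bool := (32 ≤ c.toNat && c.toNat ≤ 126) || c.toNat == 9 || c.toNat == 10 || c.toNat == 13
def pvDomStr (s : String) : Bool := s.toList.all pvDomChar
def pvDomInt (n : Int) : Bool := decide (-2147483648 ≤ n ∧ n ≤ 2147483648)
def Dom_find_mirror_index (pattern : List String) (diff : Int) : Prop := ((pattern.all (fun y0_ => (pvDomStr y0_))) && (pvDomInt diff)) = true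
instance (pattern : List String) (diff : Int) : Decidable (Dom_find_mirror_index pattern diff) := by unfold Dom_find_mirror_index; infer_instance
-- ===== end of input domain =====

-- B precomputes the mismatch count of every pair of (width-truncated) rows in one staged pass and
-- then totals the table along the anti-diagonal p+q = 2y+1 of each candidate line, instead of A's
-- expand-outward rescan of characters around every candidate; same result on Pre_.

-- ===== PORT A =====
-- pattern[i] as a string (indices used are in range under Pre_)
def pvRowA (pattern : List String) (i : Int) : String :=
  (PySem.List.pyGet? pattern i).getD ""

-- the inner 'for x in range(len(pattern[0]))' loop, accumulating into diffs
def pvStepA (pattern : List String) (prior next diffs : Int) : Int :=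
  (PySem.List.pyRange 0 (PySem.Str.len (pvRowA pattern 0)) 1).foldl
    (fun d x =>
      d + (if (PySem.Str.pyGet? (pvRowA pattern prior) x).getD ' '
             ≠ (PySem.Str.pyGet? (pvRowA pattern next) x).getD ' ' then 1 else 0)) diffs

-- the 'while 0 <= prior < next < len(pattern)' loop
def pvWhileA (pattern : List String) (prior next diffs : Int) : Int :=
  if h : 0 ≤ prior ∧ prior < next ∧ next < (pattern.length : Int) then
    pvWhileA pattern (prior - 1) (next + 1) (pvStepA pattern prior next diffs)
  else diffs
termination_by ((pattern.length : Int) - next).toNat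
decreasing_by omega

-- the 'for y in range(len(pattern)-1)' loop with its early return
def pvOuterA (pattern : List String) (diff : Int) : List Int → Int
  | [] => 0
  | y :: ys => if pvWhileA pattern y (y + 1) 0 = diff then y + 1 else pvOuterA pattern diff ys

def find_mirror_index (pattern : List String) (diff : Int) : Int :=
  pvOuterA pattern diff (PySem.List.pyRange 0 ((pattern.length : Int) - 1) 1)

-- ===== PORT B =====
-- sum(a != b for a, b in zip(ra, rb))
def pvMism (ra rb : List Char) : Int :=
  (ra.zip rb).foldl (fun t p => t + (if p.1 ≠ p.2 then 1 else 0)) 0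

-- stage 1: 'for p in range(n): for q in range(p+1, n): m[(p,q)] = …'
def pvBuild (rows : List (List Char)) (n : Int) : PySem.Dict (Int × Int) Int :=
  (PySem.List.pyRange 0 n 1).foldl
    (fun d p =>
      (PySem.List.pyRange (p + 1) n 1).foldl
        (fun d q =>
          d.insert (p, q)
            (pvMism ((PySem.List.pyGet? rows p).getD []) ((PySem.List.pyGet? rows q).getD [])))
        d)
    PySem.Dict.empty

-- stage 2 inner sum: 'sum(m[(p, s - p)] for p in range(max(0, s - n + 1), y + 1))';
-- the lookup is (get? …).getD 0: a KeyError is impossible, every key hit is inserted in stage 1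
def pvTotalB (m : PySem.Dict (Int × Int) Int) (n y : Int) : Int :=
  (PySem.List.pyRange (max 0 (2 * y + 1 - n + 1)) (y + 1) 1).foldl
    (fun t p => t + (m.get? (p, 2 * y + 1 - p)).getD 0) 0

-- the 'for y in range(n-1)' loop with its early return
def pvOuterB (m : PySem.Dict (Int × Int) Int) (n diff : Int) : List Int → Int
  | [] => 0
  | y :: ys => if pvTotalB m n y = diff then y + 1 else pvOuterB m n diff ys

def find_mirror_index_alt (pattern : List String) (diff : Int) : Int :=
  if pattern.length = 0 then 0
  else
    let n : Int := (pattern.length : Int)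
    let w : Int := PySem.Str.len (pattern.headD "")  -- pattern[0]; the list is nonempty here
    let rows := pattern.map (fun p => PySem.List.slice p.toList none (some w))  -- p[:w]
    pvOuterB (pvBuild rows n) n diff (PySem.List.pyRange 0 (n - 1) 1)

-- ===== PRECONDITION & SPEC =====
-- Pre_ requires every row to be at least as long as the first row. On patterns with a shorter row A
-- raises IndexError whenever that row is reached by a comparison; A only returns on such ragged
-- input when an earlier candidate line happens to match first, so a few returning inputs are excluded.
def Pre_find_mirror_index (pattern : List String) (diff : Int) : Prop :=
  ∀ s ∈ pattern, PySem.Str.len (pattern.headD "") ≤ PySem.Str.len s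
instance (pattern : List String) (diff : Int) : Decidable (Pre_find_mirror_index pattern diff) := by
  unfold Pre_find_mirror_index; infer_instance

def pvWitness_find_mirror_index : List String × Int := (["#.#", "#.#", "##."], 0)

def Spec_find_mirror_index (pattern : List String) (diff : Int) (out : Int) : Prop := out = find_mirror_index_alt pattern diff
instance (pattern : List String) (diff : Int) (out : Int) : Decidable (Spec_find_mirror_index pattern diff out) := by unfold Spec_find_mirror_index; infer_instance

-- ===== CLAIM (what is proved, stated in full; the proofs are below) =====
def Claim_equal_find_mirror_index : Prop := ∀ (pattern : List String) (diff : Int), Dom_find_mirror_index pattern diff → Pre_find_mirror_index pattern diff → Spec_find_mirror_index pattern diff (find_mirror_index pattern diff)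

-- ===== LEMMAS AND PROOFS =====

-- a fold of inserts whose value is a function of the key: lookup = the function on the inserted keys
theorem pv_getD_foldl_insert {κ ν : Type} [BEq κ] [LawfulBEq κ] (g : κ → ν)
    (L : List κ) (d : PySem.Dict κ ν) (k : κ) (dflt : ν) :
    ((L.foldl (fun d k' => d.insert k' (g k')) d).get? k).getD dflt
      = if k ∈ L then g k else (d.get? k).getD dflt := by
  induction L generalizing d with
  | nil => simp
  | cons a L ih =>
      simp only [List.foldl_cons, ih, List.mem_cons]
      by_cases hL : k ∈ L
      · simp [hL]
      · by_cases hk : k = a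
        · subst hk; simp [hL, PySem.Dict.get?_insert_self]
        · simp [hL, hk, PySem.Dict.get?_insert_of_ne _ _ hk]

-- the flat key list of the nested build loops
def pvKeys (n : Int) : List (Int × Int) :=
  (PySem.List.pyRange 0 n 1).flatMap (fun p => (PySem.List.pyRange (p + 1) n 1).map (fun q => (p, q)))

theorem pv_mem_pvKeys (n p q : Int) :
    (p, q) ∈ pvKeys n ↔ 0 ≤ p ∧ p < q ∧ q < n := by
  unfold pvKeys
  simp only [List.mem_flatMap, List.mem_map, PySem.List.mem_pyRange_one, Prod.mk.injEq]
  constructor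
  · rintro ⟨p', ⟨hp0, hpn⟩, q', ⟨hq1, hqn⟩, hpq, hqq⟩
    subst hpq; subst hqq; omega
  · intro h; exact ⟨p, ⟨h.1, by omega⟩, q, ⟨by omega, h.2.2⟩, rfl, rfl⟩

-- the nested build equals the flat fold over pvKeys
theorem pv_build_flat (rows : List (List Char)) (n : Int) :
    pvBuild rows n =
      (pvKeys n).foldl
        (fun d k =>
          d.insert k (pvMism ((PySem.List.pyGet? rows k.1).getD []) ((PySem.List.pyGet? rows k.2).getD [])))
        PySem.Dict.empty := by
  unfold pvBuild pvKeys
  generalize PySem.List.pyRange 0 n 1 = outer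
  generalize (PySem.Dict.empty : PySem.Dict (Int × Int) Int) = d0
  induction outer generalizing d0 with
  | nil => rfl
  | cons a l ih =>
      simp only [List.foldl_cons, List.flatMap_cons, List.foldl_append, List.foldl_map]
      exact ih _

-- dict lookup = row-pair mismatch, for every in-range key
theorem pv_getD_build (rows : List (List Char)) (n p q : Int)
    (h : 0 ≤ p ∧ p < q ∧ q < n) :
    ((pvBuild rows n).get? (p, q)).getD 0
      = pvMism ((PySem.List.pyGet? rows p).getD []) ((PySem.List.pyGet? rows q).getD []) := by
  rw [pv_build_flat, pv_getD_foldl_insert]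
  rw [if_pos ((pv_mem_pvKeys n p q).mpr h)]

-- per-character sum over index range = sum over the zip of the truncated rows
theorem pv_sum_eq (s t : List Char) :
    ∀ (wn : Nat), wn ≤ s.length → wn ≤ t.length →
      ((PySem.List.pyRange 0 (wn : Int) 1).map
          (fun x => if (PySem.List.pyGet? s x).getD ' ' ≠ (PySem.List.pyGet? t x).getD ' ' then (1 : Int) else 0)).sum
        = (((s.take wn).zip (t.take wn)).map (fun p => if p.1 ≠ p.2 then (1 : Int) else 0)).sum := by
  intro wn
  induction wn with
  | zero => intro _ _; simp [PySem.List.pyRange_one_eq_nil]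
  | succ k ih =>
      intro hs ht
      have hrange : PySem.List.pyRange 0 ((k + 1 : Nat) : Int) 1
          = PySem.List.pyRange 0 (k : Int) 1 ++ [(k : Int)] := by
        push_cast
        exact PySem.List.pyRange_one_succ_right (by omega)
      have hks : k < s.length := by omega
      have hkt : k < t.length := by omega
      have hzip : (s.take (k + 1)).zip (t.take (k + 1))
          = (s.take k).zip (t.take k) ++ [(s[k], t[k])] := by
        rw [List.take_add_one, List.take_add_one, List.getElem?_eq_getElem hks, List.getElem?_eq_getElem hkt]
        rw [List.zip_append (by simp [List.length_take]; omega)]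
        rfl
      rw [hrange, hzip, List.map_append, List.map_append, List.sum_append, List.sum_append,
        ih (by omega) (by omega)]
      simp [List.getElem?_eq_getElem hks, List.getElem?_eq_getElem hkt]

-- key step lemma: A's character loop over two in-range rows equals the pair's truncated-row mismatch
theorem pvStep_eq (pattern : List String) (prior next d : Int)
    (hpre : Pre_find_mirror_index pattern 0)
    (hp0 : 0 ≤ prior) (hpn : prior < next) (hn : next < (pattern.length : Int)) :
    pvStepA pattern prior next d =
      d + pvMism
        ((PySem.List.pyGet? (pattern.map (fun p => PySem.List.slice p.toList none (some (PySem.Str.len (pattern.headD ""))))) prior).getD [])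
        ((PySem.List.pyGet? (pattern.map (fun p => PySem.List.slice p.toList none (some (PySem.Str.len (pattern.headD ""))))) next).getD []) := by
  have hne : pattern ≠ [] := by
    intro h; subst h; simp at hn; omega
  have hh0 : (PySem.List.pyGet? pattern 0).getD "" = pattern.headD "" := by
    cases pattern with
    | nil => exact absurd rfl hne
    | cons a l => simp
  set h0 := pattern.headD "" with hh0def
  have hlen : PySem.Str.len h0 = (h0.toList.length : Int) := by simp
  set wn : Nat := h0.toList.length with hwn
  have hn0 : 0 ≤ next := by omega
  have hplt : prior.toNat < pattern.length := by omega
  have hnlt : next.toNat < pattern.length := by omega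
  have hrowAp : pvRowA pattern prior = pattern[prior.toNat] := by
    unfold pvRowA
    rw [PySem.List.pyGet?_of_nonneg _ hp0, List.getElem?_eq_getElem hplt]; rfl
  have hrowAn : pvRowA pattern next = pattern[next.toNat] := by
    unfold pvRowA
    rw [PySem.List.pyGet?_of_nonneg _ hn0, List.getElem?_eq_getElem hnlt]; rfl
  have hrowBp :
      (PySem.List.pyGet? (pattern.map (fun p => PySem.List.slice p.toList none (some (PySem.Str.len h0)))) prior).getD []
        = pattern[prior.toNat].toList.take wn := by
    rw [PySem.List.pyGet?_of_nonneg _ hp0, List.getElem?_map, List.getElem?_eq_getElem hplt]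
    simp only [Option.map_some, Option.getD_some]
    rw [hlen]
    exact PySem.List.slice_to_natCast ..
  have hrowBn :
      (PySem.List.pyGet? (pattern.map (fun p => PySem.List.slice p.toList none (some (PySem.Str.len h0)))) next).getD []
        = pattern[next.toNat].toList.take wn := by
    rw [PySem.List.pyGet?_of_nonneg _ hn0, List.getElem?_map, List.getElem?_eq_getElem hnlt]
    simp only [Option.map_some, Option.getD_some]
    rw [hlen]
    exact PySem.List.slice_to_natCast ..
  have hPlen : wn ≤ pattern[prior.toNat].toList.length := by
    have := hpre pattern[prior.toNat] (List.getElem_mem _)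
    simp only [PySem.Str.len_eq, ← hh0def] at this
    exact_mod_cast this
  have hNlen : wn ≤ pattern[next.toNat].toList.length := by
    have := hpre pattern[next.toNat] (List.getElem_mem _)
    simp only [PySem.Str.len_eq, ← hh0def] at this
    exact_mod_cast this
  unfold pvStepA
  rw [hrowBp, hrowBn]
  rw [show pvRowA pattern 0 = h0 from by unfold pvRowA; rw [hh0]]
  rw [hrowAp, hrowAn]
  rw [PySem.List.foldl_add]
  unfold pvMism
  rw [PySem.List.foldl_add]
  simp only [PySem.Str.pyGet?_eq, hlen, zero_add]
  exact congrArg (d + ·) (pv_sum_eq _ _ wn hPlen hNlen)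

-- A's expand-around-the-line loop computes the anti-diagonal sum of truncated-row mismatches
theorem pvWhileA_sum (pattern : List String) (s : Int)
    (hpre : Pre_find_mirror_index pattern 0) :
    ∀ (fuel : ℕ) (prior t : Int), fuel = (((pattern.length : Int)) - (s - prior)).toNat →
      2 * prior < s →
      pvWhileA pattern prior (s - prior) t =
        t + ((PySem.List.pyRange (max 0 (s - (pattern.length : Int) + 1)) (prior + 1) 1).map
              (fun p => pvMism
                ((PySem.List.pyGet? (pattern.map (fun r => PySem.List.slice r.toList none (some (PySem.Str.len (pattern.headD ""))))) p).getD [])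
                ((PySem.List.pyGet? (pattern.map (fun r => PySem.List.slice r.toList none (some (PySem.Str.len (pattern.headD ""))))) (s - p)).getD []))).sum := by
  intro fuel
  induction fuel with
  | zero =>
      intro prior t hf hps
      rw [pvWhileA, dif_neg (by omega)]
      rw [PySem.List.pyRange_one_eq_nil (by omega)]
      simp
  | succ k ih =>
      intro prior t hf hps
      by_cases hg : 0 ≤ prior ∧ s - prior < (pattern.length : Int)
      · rw [pvWhileA, dif_pos ⟨hg.1, by omega, hg.2⟩]
        rw [pvStep_eq pattern prior (s - prior) t hpre hg.1 (by omega) hg.2]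
        have hrec := ih (prior - 1)
          (t + pvMism
            ((PySem.List.pyGet? (pattern.map (fun r => PySem.List.slice r.toList none (some (PySem.Str.len (pattern.headD ""))))) prior).getD [])
            ((PySem.List.pyGet? (pattern.map (fun r => PySem.List.slice r.toList none (some (PySem.Str.len (pattern.headD ""))))) (s - prior)).getD []))
          (by omega) (by omega)
        rw [show s - prior + 1 = s - (prior - 1) from by omega, hrec]
        rw [show prior - 1 + 1 = prior from by omega]
        rw [PySem.List.pyRange_one_succ_right (a := max 0 (s - (pattern.length : Int) + 1)) (by omega)]
        rw [List.map_append, List.sum_append]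
        simp only [List.map_cons, List.map_nil, List.sum_cons, List.sum_nil]
        ring
      · rw [pvWhileA, dif_neg (by omega)]
        rw [PySem.List.pyRange_one_eq_nil (by omega)]
        simp

-- B's table sum equals the same anti-diagonal sum
theorem pvTotalB_sum (pattern : List String) (y : Int)
    (hy0 : 0 ≤ y) (hyn : y + 1 < (pattern.length : Int)) :
    pvTotalB (pvBuild (pattern.map (fun r => PySem.List.slice r.toList none (some (PySem.Str.len (pattern.headD ""))))) (pattern.length : Int)) (pattern.length : Int) y =
      ((PySem.List.pyRange (max 0 (2 * y + 1 - (pattern.length : Int) + 1)) (y + 1) 1).map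
        (fun p => pvMism
          ((PySem.List.pyGet? (pattern.map (fun r => PySem.List.slice r.toList none (some (PySem.Str.len (pattern.headD ""))))) p).getD [])
          ((PySem.List.pyGet? (pattern.map (fun r => PySem.List.slice r.toList none (some (PySem.Str.len (pattern.headD ""))))) (2 * y + 1 - p)).getD []))).sum := by
  unfold pvTotalB
  rw [PySem.List.foldl_add]
  rw [zero_add]
  apply congrArg List.sum
  apply List.map_congr_left
  intro p hp
  rw [PySem.List.mem_pyRange_one] at hp
  exact pv_getD_build _ _ p (2 * y + 1 - p) (by omega)

-- the per-candidate tests of the two outer loops agree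
theorem pv_test_eq (pattern : List String) (y : Int)
    (hpre : Pre_find_mirror_index pattern 0)
    (hy0 : 0 ≤ y) (hyn : y + 1 < (pattern.length : Int)) :
    pvWhileA pattern y (y + 1) 0 =
      pvTotalB (pvBuild (pattern.map (fun r => PySem.List.slice r.toList none (some (PySem.Str.len (pattern.headD ""))))) (pattern.length : Int)) (pattern.length : Int) y := by
  have hA := pvWhileA_sum pattern (2 * y + 1) hpre
    (((pattern.length : Int)) - (2 * y + 1 - y)).toNat y 0 rfl (by omega)
  rw [show (2 : Int) * y + 1 - y = y + 1 from by omega] at hA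
  rw [hA, pvTotalB_sum pattern y hy0 hyn, zero_add]

theorem pvOuter_eq (pattern : List String) (diff : Int)
    (hpre : Pre_find_mirror_index pattern 0) :
    ∀ ys : List Int, (∀ y ∈ ys, 0 ≤ y ∧ y + 1 < (pattern.length : Int)) →
      pvOuterA pattern diff ys =
        pvOuterB (pvBuild (pattern.map (fun r => PySem.List.slice r.toList none (some (PySem.Str.len (pattern.headD ""))))) (pattern.length : Int)) (pattern.length : Int) diff ys := by
  intro ys
  induction ys with
  | nil => intro _; rfl
  | cons y ys ih =>
      intro hb
      have hy := hb y (List.mem_cons_self)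
      unfold pvOuterA pvOuterB
      rw [pv_test_eq pattern y hpre hy.1 hy.2]
      rw [ih (fun z hz => hb z (List.mem_cons_of_mem _ hz))]

-- ===== VERDICT (by name: the statement is the Claim_ definition above) =====
theorem find_mirror_index_spec : Claim_equal_find_mirror_index := by
  intro pattern diff _hdom hpre
  unfold Spec_find_mirror_index find_mirror_index find_mirror_index_alt
  have hpre0 : Pre_find_mirror_index pattern 0 := hpre
  split
  · rename_i h
    have : pattern.length = 0 := h
    simp [PySem.List.pyRange_one_eq_nil, this, pvOuterA]
  · exact pvOuter_eq pattern diff hpre0 _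
      (fun y hy => by
        rw [PySem.List.mem_pyRange_one] at hy
        exact ⟨hy.1, by omega⟩)
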